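-- pv_equiv track=rewrite | github.com/dezuivere/En-Tcy_Translator | Code/updates.py | build_translation_dict
-- ===== SOURCE A (Python) =====
-- def build_translation_dict(kannada_sentences, tulu_sentences):
--     translation_dict = {}
--     for kn_sentence, tu_sentence in zip(kannada_sentences, tulu_sentences):
--         kn_words = kn_sentence.split()
--         tu_words = tu_sentence.split()
--         for kn_word, tu_word in zip(kn_words, tu_words):
--             if kn_word not in translation_dict:
--                 translation_dict[kn_word] = tu_word
--     return translation_dict
-- ===== SOURCE B (Python) =====
-- def build_translation_dict(kannada_sentences, tulu_sentences):
--     pairs = [pair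
--              for kn_sentence, tu_sentence in zip(kannada_sentences, tulu_sentences)
--              for pair in zip(kn_sentence.split(), tu_sentence.split())]
--     # last-write-wins over the reversed pair stream = earliest forward pair wins
--     first_value = dict(reversed(pairs))
--     # dict.fromkeys keeps first-occurrence key order
--     return {kn: first_value[kn] for kn in dict.fromkeys(kn for kn, _ in pairs)}
-- ===== Notes on version B (the rewrite author's own statement) =====
-- stated objective: alternative
-- what changed: Instead of a stateful pass with a membership check, B flattens the aligned word pairs once, builds the value map by last-write-wins over the REVERSED pair stream (dict(reversed(pairs)), so the earliest forward pair wins without any test), recovers first-occurrence key order with dict.fromkeys, and assembles the result by lookup.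
import Mathlib
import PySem

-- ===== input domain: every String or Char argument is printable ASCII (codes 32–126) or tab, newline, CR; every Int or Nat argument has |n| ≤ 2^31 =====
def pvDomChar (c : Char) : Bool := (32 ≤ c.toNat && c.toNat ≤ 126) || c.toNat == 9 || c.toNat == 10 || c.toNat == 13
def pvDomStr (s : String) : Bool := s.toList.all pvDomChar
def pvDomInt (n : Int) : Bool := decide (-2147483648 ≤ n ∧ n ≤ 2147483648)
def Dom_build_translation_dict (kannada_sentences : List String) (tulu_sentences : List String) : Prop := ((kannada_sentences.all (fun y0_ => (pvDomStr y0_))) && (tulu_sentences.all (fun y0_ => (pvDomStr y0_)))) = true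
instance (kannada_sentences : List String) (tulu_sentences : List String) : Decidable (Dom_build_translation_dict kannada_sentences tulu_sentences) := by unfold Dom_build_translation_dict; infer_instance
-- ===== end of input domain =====

-- B replaces A's stateful membership-checked insertion by last-write-wins over the
-- reversed pair stream plus a fromkeys pass for key order (alternative, same cost).

-- ===== PORT A =====
def build_translation_dict (kannada_sentences : List String) (tulu_sentences : List String) : List (String × String) :=
  ((List.zip kannada_sentences tulu_sentences).foldl
    (fun translation_dict s =>
      let kn_words := PySem.Str.split₀ s.1
      let tu_words := PySem.Str.split₀ s.2
      (List.zip kn_words tu_words).foldl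
        (fun translation_dict w =>
          if translation_dict.contains w.1 then translation_dict
          else translation_dict.insert w.1 w.2)
        translation_dict)
    PySem.Dict.empty).items

-- ===== PORT B =====
-- 'first_value[kn]' is ported as getD with an unreachable default: every kn produced
-- by the fromkeys pass is a key of first_value (both are built from the same pairs),
-- so the lookup never raises in Python and the default is never read (exact).
def build_translation_dict_alt (kannada_sentences : List String) (tulu_sentences : List String) : List (String × String) :=
  let pairs := (List.zip kannada_sentences tulu_sentences).flatMap
    (fun s => List.zip (PySem.Str.split₀ s.1) (PySem.Str.split₀ s.2))
  let first_value := pairs.reverse.foldl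
    (fun d p => d.insert p.1 p.2) PySem.Dict.empty
  let order := (pairs.map Prod.fst).foldl
    (fun d kn => d.insert kn (none : Option String)) PySem.Dict.empty
  (order.keys.foldl (fun d kn => d.insert kn (first_value.getD kn "")) PySem.Dict.empty).items

-- ===== PRECONDITION & SPEC =====
def Spec_build_translation_dict (kannada_sentences : List String) (tulu_sentences : List String) (out : List (String × String)) : Prop := out = build_translation_dict_alt kannada_sentences tulu_sentences
instance (kannada_sentences : List String) (tulu_sentences : List String) (out : List (String × String)) : Decidable (Spec_build_translation_dict kannada_sentences tulu_sentences out) := by unfold Spec_build_translation_dict; infer_instance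

-- ===== CLAIM (what is proved, stated in full; the proofs are below) =====
def Claim_equal_build_translation_dict : Prop := ∀ (kannada_sentences : List String) (tulu_sentences : List String), Dom_build_translation_dict kannada_sentences tulu_sentences → Spec_build_translation_dict kannada_sentences tulu_sentences (build_translation_dict kannada_sentences tulu_sentences)

-- ===== LEMMAS AND PROOFS =====

-- A's nested folds = a single fold over the flattened pair list
theorem foldl_flatMap_eq {α β γ : Type} (g : α → List β) (f : γ → β → γ) :
    ∀ (l : List α) (init : γ),
      (l.flatMap g).foldl f init = l.foldl (fun acc x => (g x).foldl f acc) init := by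
  intro l
  induction l with
  | nil => intro init; rfl
  | cons x xs ih =>
      intro init
      simp [List.flatMap_cons, List.foldl_append, ih]

-- the lookup produced by A's insert-if-absent fold: the FIRST pair with this key

theorem get?_foldl_step (k : String) :
    ∀ (ps : List (String × String)) (d : PySem.Dict String String),
      (ps.foldl (fun d w => if d.contains w.1 then d else d.insert w.1 w.2) d).get? k
        = (d.get? k).or ((ps.find? (fun p => p.1 == k)).map (·.2)) := by
  intro ps
  induction ps with
  | nil => intro d; simp
  | cons p ps ih =>
      intro d
      simp only [List.foldl_cons, ih, List.find?_cons]
      by_cases hk : p.1 = k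
      · subst hk
        simp only [beq_self_eq_true]
        by_cases hc : d.contains p.1 = true
        · rw [if_pos hc]
          rcases (PySem.Dict.contains_eq_isSome_get? d p.1 ▸ hc : (d.get? p.1).isSome = true) with h
          cases hg : d.get? p.1 with
          | none => rw [hg] at h; simp at h
          | some v => simp [Option.or]
        · rw [if_neg hc]
          have hn : d.get? p.1 = none := by
            rw [PySem.Dict.get?_eq_none_iff_contains]
            simpa using hc
          simp [PySem.Dict.get?_insert_self, hn, Option.or]
      · have hb : (p.1 == k) = false := by simpa using hk
        simp only [hb]
        by_cases hc : d.contains p.1 = true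
        · simp [hc]
        · simp only [Bool.not_eq_true] at hc
          simp [hc, PySem.Dict.get?_insert_of_ne d _ (Ne.symm hk)]

theorem get?_foldl_rev (k : String) :
    ∀ (ps : List (String × String)) (d : PySem.Dict String String),
      (ps.reverse.foldl (fun d p => d.insert p.1 p.2) d).get? k
        = ((ps.find? (fun p => p.1 == k)).map (·.2)).or (d.get? k) := by
  intro ps
  induction ps with
  | nil => intro d; simp
  | cons p ps ih =>
      intro d
      rw [List.reverse_cons, List.foldl_append]
      simp only [List.foldl_cons, List.foldl_nil, List.find?_cons]
      by_cases hk : p.1 = k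
      · subst hk
        simp [PySem.Dict.get?_insert_self, Option.or]
      · have hb : (p.1 == k) = false := by simpa using hk
        rw [PySem.Dict.get?_insert_of_ne _ _ (Ne.symm hk), ih, hb]

theorem keys_step (d : PySem.Dict String String) (k v : String) :
    (if d.contains k then d else d.insert k v).keys = PySem.Set.add d.keys k := by
  by_cases hc : d.contains k = true
  · have hm : k ∈ d.keys := (PySem.Dict.contains_iff_mem_keys d k).mp hc
    rw [if_pos hc]
    simp [PySem.Set.add, hm]
  · simp only [Bool.not_eq_true] at hc
    have hm : k ∉ d.keys := by
      intro h
      rw [(PySem.Dict.contains_iff_mem_keys d k).mpr h] at hc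
      simp at hc
    rw [if_neg (by simp [hc]), PySem.Dict.keys_insert_of_not_contains d (v := v) hc]
    simp [PySem.Set.add, hm]

theorem keys_foldl_step :
    ∀ (ps : List (String × String)) (d : PySem.Dict String String),
      (ps.foldl (fun d w => if d.contains w.1 then d else d.insert w.1 w.2) d).keys
        = PySem.Set.update d.keys (ps.map Prod.fst) := by
  intro ps
  induction ps with
  | nil => intro d; simp [PySem.Set.update_nil]
  | cons p ps ih =>
      intro d
      rw [List.foldl_cons, ih, List.map_cons, PySem.Set.update_cons, keys_step]

-- both dicts return the value of the first pair with the given key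
theorem vals_agree (ps : List (String × String)) (k : String) :
    (ps.foldl (fun d w => if d.contains w.1 then d else d.insert w.1 w.2) PySem.Dict.empty).getD k ""
      = (ps.reverse.foldl (fun d p => d.insert p.1 p.2) PySem.Dict.empty).getD k "" := by
  rw [PySem.Dict.getD_eq_get?_getD, PySem.Dict.getD_eq_get?_getD,
      get?_foldl_step, get?_foldl_rev, PySem.Dict.get?_empty]
  cases (ps.find? (fun p => p.1 == k)) <;> simp [Option.or]

-- ===== VERDICT (by name: the statement is the Claim_ definition above) =====
theorem build_translation_dict_spec : Claim_equal_build_translation_dict := by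
  intro ks ts _
  show build_translation_dict ks ts = build_translation_dict_alt ks ts
  simp only [build_translation_dict, build_translation_dict_alt]
  rw [← foldl_flatMap_eq]
  set ps := (List.zip ks ts).flatMap
      (fun s => List.zip (PySem.Str.split₀ s.1) (PySem.Str.split₀ s.2)) with hps
  set DA := ps.foldl (fun d w => if d.contains w.1 then d else d.insert w.1 w.2)
      PySem.Dict.empty with hDA
  set R := ps.reverse.foldl (fun d p => d.insert p.1 p.2) PySem.Dict.empty with hR
  set O := (ps.map Prod.fst).foldl
      (fun d kn => d.insert kn (none : Option String)) PySem.Dict.empty with hO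
  have hkeysA : DA.keys = PySem.Set.ofList (ps.map Prod.fst) := by
    rw [hDA, keys_foldl_step, PySem.Dict.keys_empty, PySem.Set.update_nil_left]
  have hkeysO : O.keys = PySem.Set.ofList (ps.map Prod.fst) := by
    rw [hO, PySem.Dict.keys_foldl_insert, PySem.Dict.keys_empty, PySem.Set.update_nil_left]
  have hndA : DA.keys.Nodup := by rw [hkeysA]; exact PySem.Set.nodup_ofList _
  have hndO : O.keys.Nodup := by rw [hkeysO]; exact PySem.Set.nodup_ofList _
  rw [PySem.Dict.items_eq_map_keys DA hndA "",
      PySem.Dict.items_foldl_insert_fresh O.keys (fun kn => kn) (fun kn => R.getD kn "")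
        PySem.Dict.empty (fun a _ => PySem.Dict.contains_empty a) (by simpa using hndO)]
  have : PySem.Dict.empty.items = ([] : List (String × String)) := rfl
  rw [this, List.nil_append, hkeysA, hkeysO]
  exact List.map_congr_left (fun k _ => by rw [vals_agree])
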